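-- pv_equiv track=rewrite | github.com/daniel-reich/ubiquitous-fiesta | CNpZrDFf3Ct7MzQrw_5.py | trouble
-- ===== SOURCE A (Python) =====
-- def trouble(num1, num2):
--   num1 = str(num1)
--   num2 = str(num2)
--   triples = [c * 3 for c in "0123456789"]
--   doubles = [c * 2 for c in "0123456789"]
--   for t, d in zip(triples, doubles):
--     if t in num1 and d in num2:
--       return True
--   return False
-- ===== SOURCE B (Python) =====
-- def trouble(num1, num2):
--     s1, s2 = str(num1), str(num2)
--     tripled = {a for a, b, c in zip(s1, s1[1:], s1[2:])
--                if a == b == c and a in "0123456789"}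
--     doubled = {a for a, b in zip(s2, s2[1:])
--                if a == b and a in "0123456789"}
--     return bool(tripled & doubled)
-- ===== Notes on version B (the rewrite author's own statement) =====
-- stated objective: alternative
-- what changed: Instead of 10 substring searches ('ccc' in num1 and 'cc' in num2 for each digit c), B does one sliding-window pass over each number's string collecting the set of digits that appear tripled/doubled, and tests the sets' intersection.
import Mathlib
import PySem

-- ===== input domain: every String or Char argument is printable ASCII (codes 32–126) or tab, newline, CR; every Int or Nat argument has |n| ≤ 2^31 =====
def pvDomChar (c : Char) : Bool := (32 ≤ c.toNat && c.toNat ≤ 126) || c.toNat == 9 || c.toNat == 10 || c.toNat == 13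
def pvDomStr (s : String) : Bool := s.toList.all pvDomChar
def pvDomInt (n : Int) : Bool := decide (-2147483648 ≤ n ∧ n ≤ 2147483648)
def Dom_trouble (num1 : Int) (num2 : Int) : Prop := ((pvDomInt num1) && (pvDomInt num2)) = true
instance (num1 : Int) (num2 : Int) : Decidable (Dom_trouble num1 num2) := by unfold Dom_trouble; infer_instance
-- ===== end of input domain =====

-- B replaces A's ten substring searches by one sliding-window pass per number
-- collecting the sets of tripled/doubled digits and intersecting them (alternative decomposition).

-- ===== PORT A =====
-- the early-return for-loop over zip(triples, doubles)
def troubleGo : List (String × String) → String → String → Bool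
  | [], _, _ => false
  | (t, d) :: rest, n1, n2 =>
    if PySem.Str.isIn t n1 && PySem.Str.isIn d n2 then true
    else troubleGo rest n1 n2

def trouble (num1 : Int) (num2 : Int) : Bool :=
  let n1 := PySem.Int.toStr num1
  let n2 := PySem.Int.toStr num2
  let triples := "0123456789".toList.map (fun c => String.ofList [c, c, c])  -- c * 3
  let doubles := "0123456789".toList.map (fun c => String.ofList [c, c])    -- c * 2
  troubleGo (triples.zip doubles) n1 n2

-- ===== PORT B =====
def trouble_alt (num1 : Int) (num2 : Int) : Bool :=
  let s1 := (PySem.Int.toStr num1).toList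
  let s2 := (PySem.Int.toStr num2).toList
  -- {a for a,b,c in zip(s1, s1[1:], s1[2:]) if a == b == c and a in "0123456789"}
  let tripled := PySem.Set.ofList ((((s1.zip (s1.drop 1)).zip (s1.drop 2)).filter
      (fun p => p.1.1 == p.1.2 && p.1.2 == p.2 && "0123456789".toList.contains p.1.1)).map
      (fun p => p.1.1))
  -- {a for a,b in zip(s2, s2[1:]) if a == b and a in "0123456789"}
  let doubled := PySem.Set.ofList (((s2.zip (s2.drop 1)).filter
      (fun p => p.1 == p.2 && "0123456789".toList.contains p.1)).map (fun p => p.1))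
  !(PySem.Set.inter tripled doubled).isEmpty

-- ===== PRECONDITION & SPEC =====
def Spec_trouble (num1 : Int) (num2 : Int) (out : Bool) : Prop := out = trouble_alt num1 num2
instance (num1 : Int) (num2 : Int) (out : Bool) : Decidable (Spec_trouble num1 num2 out) := by unfold Spec_trouble; infer_instance

-- ===== CLAIM (what is proved, stated in full; the proofs are below) =====
def Claim_equal_trouble : Prop := ∀ (num1 : Int) (num2 : Int), Dom_trouble num1 num2 → Spec_trouble num1 num2 (trouble num1 num2)

-- ===== LEMMAS AND PROOFS =====

theorem go_eq_any (f g : Char → String) (l : List Char) (n1 n2 : String) :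
    troubleGo ((l.map f).zip (l.map g)) n1 n2
      = l.any (fun c => PySem.Str.isIn (f c) n1 && PySem.Str.isIn (g c) n2) := by
  induction l with
  | nil => rfl
  | cons x t ih =>
    simp only [List.map_cons, List.zip_cons_cons, troubleGo, List.any_cons, ih]
    by_cases h : (PySem.Str.isIn (f x) n1 && PySem.Str.isIn (g x) n2) = true <;> simp_all

theorem window2 (s : List Char) (c : Char) :
    (c, c) ∈ s.zip (s.drop 1) ↔ [c, c] <:+: s := by
  induction s with
  | nil => simp
  | cons x t ih =>
    cases t with
    | nil =>
      constructor
      · intro h; simp at h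
      · intro h; have := h.length_le; simp at this
    | cons y u =>
      simp only [List.drop_succ_cons, List.drop_zero] at *
      rw [List.infix_cons_iff]
      constructor
      · intro h
        rcases List.mem_cons.mp h with h | h
        · rw [Prod.mk.injEq] at h
          obtain ⟨rfl, rfl⟩ := h
          exact Or.inl ⟨u, rfl⟩
        · exact Or.inr (ih.mp h)
      · intro h
        rcases h with h | h
        · rcases List.cons_prefix_cons.mp h with ⟨rfl, h2⟩
          rcases List.cons_prefix_cons.mp h2 with ⟨rfl, _⟩
          exact List.mem_cons_self
        · exact List.mem_cons_of_mem _ (ih.mpr h)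

theorem window3 (s : List Char) (c : Char) :
    ((c, c), c) ∈ (s.zip (s.drop 1)).zip (s.drop 2) ↔ [c, c, c] <:+: s := by
  induction s with
  | nil => simp
  | cons x t ih =>
    cases t with
    | nil =>
      constructor
      · intro h; simp at h
      · intro h; have := h.length_le; simp at this
    | cons y u =>
      cases u with
      | nil =>
        constructor
        · intro h; simp at h
        · intro h; have := h.length_le; simp at this
      | cons z v =>
        simp only [List.drop_succ_cons, List.drop_zero] at *
        rw [List.infix_cons_iff]
        constructor
        · intro h
          rcases List.mem_cons.mp h with h | h
          · rw [Prod.mk.injEq, Prod.mk.injEq] at h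
            obtain ⟨⟨rfl, rfl⟩, rfl⟩ := h
            exact Or.inl ⟨v, rfl⟩
          · exact Or.inr (ih.mp h)
        · intro h
          rcases h with h | h
          · rcases List.cons_prefix_cons.mp h with ⟨rfl, h2⟩
            rcases List.cons_prefix_cons.mp h2 with ⟨rfl, h3⟩
            rcases List.cons_prefix_cons.mp h3 with ⟨rfl, _⟩
            exact List.mem_cons_self
          · exact List.mem_cons_of_mem _ (ih.mpr h)

theorem trouble_true_iff (num1 num2 : Int) :
    trouble num1 num2 = true ↔
      ∃ c ∈ "0123456789".toList,
        [c, c, c] <:+: (PySem.Int.toStr num1).toList ∧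
        [c, c] <:+: (PySem.Int.toStr num2).toList := by
  unfold trouble
  rw [go_eq_any, List.any_eq_true]
  refine exists_congr fun c => and_congr_right fun _ => ?_
  rw [Bool.and_eq_true, PySem.Str.isIn_iff_infix, PySem.Str.isIn_iff_infix]
  simp

theorem trouble_alt_true_iff (num1 num2 : Int) :
    trouble_alt num1 num2 = true ↔
      ∃ c ∈ "0123456789".toList,
        [c, c, c] <:+: (PySem.Int.toStr num1).toList ∧
        [c, c] <:+: (PySem.Int.toStr num2).toList := by
  unfold trouble_alt
  rw [Bool.not_eq_true', List.isEmpty_eq_false_iff_exists_mem]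
  constructor
  · rintro ⟨x, hx⟩
    rw [PySem.Set.mem_inter, PySem.Set.mem_ofList, PySem.Set.mem_ofList] at hx
    obtain ⟨h1, h2⟩ := hx
    obtain ⟨⟨⟨a, b⟩, d⟩, hp, rfl⟩ := List.mem_map.mp h1
    obtain ⟨hpz, hpred⟩ := List.mem_filter.mp hp
    simp only [Bool.and_eq_true, beq_iff_eq, List.contains_iff_mem] at hpred
    obtain ⟨⟨hab, hbd⟩, hdig⟩ := hpred
    obtain ⟨⟨a', b'⟩, hq, h2e⟩ := List.mem_map.mp h2
    obtain ⟨hqz, hqred⟩ := List.mem_filter.mp hq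
    simp only [Bool.and_eq_true, beq_iff_eq, List.contains_iff_mem] at hqred
    obtain ⟨hab', _⟩ := hqred
    refine ⟨a, hdig, ?_, ?_⟩
    · subst hab; subst hbd; exact (window3 _ _).mp hpz
    · have : a' = a := h2e
      subst this; subst hab'; exact (window2 _ _).mp hqz
  · rintro ⟨c, hdig, h3, h2⟩
    refine ⟨c, ?_⟩
    rw [PySem.Set.mem_inter, PySem.Set.mem_ofList, PySem.Set.mem_ofList]
    constructor
    · exact List.mem_map.mpr ⟨((c, c), c),
        List.mem_filter.mpr ⟨(window3 _ _).mpr h3, by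
          simp
          simpa using hdig⟩, rfl⟩
    · exact List.mem_map.mpr ⟨(c, c),
        List.mem_filter.mpr ⟨(window2 _ _).mpr h2, by
          simp
          simpa using hdig⟩, rfl⟩

-- ===== VERDICT (by name: the statement is the Claim_ definition above) =====
theorem trouble_spec : Claim_equal_trouble := by
  intro num1 num2 _
  unfold Spec_trouble
  rw [Bool.eq_iff_iff, trouble_true_iff, trouble_alt_true_iff]
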